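-- pv_equiv track=rewrite | github.com/naezzell/edd | src/edd/pulse/_ibmq_pulse.py | make_cdd_n_str
-- ===== SOURCE A (Python) =====
-- def make_cdd_n_str(n, cdd_str=""):
--     """
--     Creates string representation of CDD_n
--     using recursion.
--     """
--     if n == 1:
--         cdd_str += "Y-f-X-f-Y-f-X-f-"
--     else:
--         cdd_str += "Y"
--         cdd_str = make_cdd_n_str(n - 1, cdd_str)
--         cdd_str += "X"
--         cdd_str = make_cdd_n_str(n - 1, cdd_str)
--         cdd_str += "Y"
--         cdd_str = make_cdd_n_str(n - 1, cdd_str)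
--         cdd_str += "X"
--         cdd_str = make_cdd_n_str(n - 1, cdd_str)
--
--     return cdd_str
-- ===== SOURCE B (Python) =====
-- def _cdd_core(n):
--     if n == 1:
--         return "Y-f-X-f-Y-f-X-f-"
--     c = _cdd_core(n - 1)
--     return "Y" + c + "X" + c + "Y" + c + "X" + c
--
-- def make_cdd_n_str(n, cdd_str=""):
--     return cdd_str + _cdd_core(n)
-- ===== Notes on version B (the rewrite author's own statement) =====
-- stated objective: simpler
-- what changed: Replaces the accumulator-threaded four-call recursion with a pure direct-return helper that builds CDD_n once and shares the single recursive result across the four quadrants, then prepends the prefix.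
import Mathlib
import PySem

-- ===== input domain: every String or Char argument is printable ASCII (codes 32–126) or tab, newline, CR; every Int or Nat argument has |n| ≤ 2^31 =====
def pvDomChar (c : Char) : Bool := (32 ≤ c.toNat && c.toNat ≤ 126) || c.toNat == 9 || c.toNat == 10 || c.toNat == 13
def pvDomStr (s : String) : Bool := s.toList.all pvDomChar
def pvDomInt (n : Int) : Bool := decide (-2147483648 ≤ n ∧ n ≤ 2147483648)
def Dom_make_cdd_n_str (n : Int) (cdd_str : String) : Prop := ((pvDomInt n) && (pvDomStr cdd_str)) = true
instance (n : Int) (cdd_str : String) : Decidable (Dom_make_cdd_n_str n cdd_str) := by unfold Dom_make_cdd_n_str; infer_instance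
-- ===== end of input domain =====

-- B replaces A's accumulator-threaded four-call recursion with a pure direct-return
-- helper shared across the four quadrants (objective: simpler).


-- ===== PORT A =====
-- A threads the accumulator through the recursion; the Python diverges (RecursionError)
-- for n ≤ 0, so Pre_ restricts to n ≥ 1 and the fuel-0 case below is unreachable there.
def make_cdd_n_str_aux : Nat → String → String
  | 0, s => s            -- unreachable under Pre_ (Python raises RecursionError for n ≤ 0)
  | 1, s => s ++ "Y-f-X-f-Y-f-X-f-"
  | (m+2), s =>
      let s1 := s ++ "Y"
      let s2 := make_cdd_n_str_aux (m+1) s1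
      let s3 := s2 ++ "X"
      let s4 := make_cdd_n_str_aux (m+1) s3
      let s5 := s4 ++ "Y"
      let s6 := make_cdd_n_str_aux (m+1) s5
      let s7 := s6 ++ "X"
      make_cdd_n_str_aux (m+1) s7

def make_cdd_n_str (n : Int) (cdd_str : String) : String :=
  make_cdd_n_str_aux n.toNat cdd_str

-- ===== PORT B =====
def cdd_core : Nat → String
  | 0 => ""              -- unreachable under Pre_ (Python raises RecursionError for n ≤ 0)
  | 1 => "Y-f-X-f-Y-f-X-f-"
  | (m+2) =>
      let c := cdd_core (m+1)
      "Y" ++ c ++ "X" ++ c ++ "Y" ++ c ++ "X" ++ c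

def make_cdd_n_str_alt (n : Int) (cdd_str : String) : String :=
  cdd_str ++ cdd_core n.toNat

-- ===== PRECONDITION & SPEC =====
-- Pre_ excludes n ≤ 0, where the Python A never returns (infinite recursion → RecursionError).
def Pre_make_cdd_n_str (n : Int) (cdd_str : String) : Prop := 1 ≤ n
instance (n : Int) (cdd_str : String) : Decidable (Pre_make_cdd_n_str n cdd_str) := by unfold Pre_make_cdd_n_str; infer_instance
def pvWitness_make_cdd_n_str : Int × String := (2, "p-")

def Spec_make_cdd_n_str (n : Int) (cdd_str : String) (out : String) : Prop := out = make_cdd_n_str_alt n cdd_str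
instance (n : Int) (cdd_str : String) (out : String) : Decidable (Spec_make_cdd_n_str n cdd_str out) := by unfold Spec_make_cdd_n_str; infer_instance

-- ===== CLAIM (what is proved, stated in full; the proofs are below) =====
def Claim_equal_make_cdd_n_str : Prop := ∀ (n : Int) (cdd_str : String), Dom_make_cdd_n_str n cdd_str → Pre_make_cdd_n_str n cdd_str → Spec_make_cdd_n_str n cdd_str (make_cdd_n_str n cdd_str)

-- ===== LEMMAS AND PROOFS =====
theorem aux_eq_core (k : Nat) : ∀ s, make_cdd_n_str_aux k s = s ++ cdd_core k := by
  induction k using Nat.strong_induction_on with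
  | _ k ih =>
    match k with
    | 0 => intro s; simp [make_cdd_n_str_aux, cdd_core]
    | 1 => intro s; simp [make_cdd_n_str_aux, cdd_core]
    | (m+2) =>
      intro s
      simp only [make_cdd_n_str_aux, cdd_core, ih (m+1) (by omega)]
      simp [String.append_assoc]

-- ===== VERDICT (by name: the statement is the Claim_ definition above) =====
theorem make_cdd_n_str_spec : Claim_equal_make_cdd_n_str := by
  intro n s _ _
  unfold Spec_make_cdd_n_str make_cdd_n_str make_cdd_n_str_alt
  exact aux_eq_core n.toNat s
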